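-- pv_equiv track=rewrite | github.com/itman85/AlgoPlayGround | CodeSignal/intro/longestWord.py | solution
-- ===== SOURCE A (Python) =====
-- def isEnglishLetter(ch):
--     return 'a' <= ch <= 'z' or 'A' <= ch <= 'Z'
--
-- def solution(text):
--     fI, lI, mfI, mlI = -1, 0, 0, 0
--     for i in range(len(text)):
--         if isEnglishLetter(text[i]):
--             if fI == -1:
--                 fI = i
--             lI = i
--             if mlI - mfI < lI - fI:
--                 mfI, mlI = fI, lI
--         else:
--             fI, lI = -1, 0
--     return text[mfI:mlI + 1]
-- ===== SOURCE B (Python) =====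
-- def isEnglishLetter(ch):
--     return 'a' <= ch <= 'z' or 'A' <= ch <= 'Z'
--
-- def solution(text):
--     # tokenize into maximal letter runs, then select the first longest
--     runs = []
--     cur = ''
--     for ch in text:
--         if isEnglishLetter(ch):
--             cur += ch
--         else:
--             if cur:
--                 runs.append(cur)
--             cur = ''
--     if cur:
--         runs.append(cur)
--     return max(runs, key=len) if runs else ''
-- ===== Notes on version B (the rewrite author's own statement) =====
-- stated objective: alternative
-- what changed: B tokenizes the text into its maximal letter runs and then selects the first longest run (empty string if there are none), replacing A's online four-index span tracker and final slice.
-- intended difference: On nonempty text whose first character is not a letter and which contains no two consecutive letters, A returns the text's first character (e.g. '.' for '.a', '1' for '123') because its best-span tracker starts at indices (0,0); B returns the first single-letter run, or the empty string when the text contains no letters at all, which is the intended longest letter word. — e.g. on solution(".a"): A returns ".", B returns "a"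
import Mathlib
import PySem

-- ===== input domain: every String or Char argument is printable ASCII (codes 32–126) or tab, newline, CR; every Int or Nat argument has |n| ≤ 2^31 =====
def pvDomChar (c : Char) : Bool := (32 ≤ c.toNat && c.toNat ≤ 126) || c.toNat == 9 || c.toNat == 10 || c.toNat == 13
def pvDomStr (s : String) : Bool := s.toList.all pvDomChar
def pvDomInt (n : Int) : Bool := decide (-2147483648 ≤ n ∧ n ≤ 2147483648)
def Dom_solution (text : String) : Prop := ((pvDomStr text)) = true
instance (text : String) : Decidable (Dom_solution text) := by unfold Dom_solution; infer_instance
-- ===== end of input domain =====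

-- B rewrites A's online four-index span tracker as tokenize-runs-then-pick-first-longest ("alternative");
-- on letter-poor texts (see D_solution) A's accidental first-character answer is replaced by the intended run.

-- ===== PORT A =====
def isEnglishLetter (ch : Char) : Bool := ('a' ≤ ch && ch ≤ 'z') || ('A' ≤ ch && ch ≤ 'Z')

-- literal port of A: for i in range(len(text)) with state (fI, lI, mfI, mlI); text[i] is in range,
-- so pyGetD is exact; the final text[mfI:mlI+1] is the list slice on the code points.
def solution (text : String) : String :=
  let cs := text.toList
  let st := (PySem.List.pyRange 0 (cs.length : Int) 1).foldl
    (fun (st : Int × Int × Int × Int) i =>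
      if isEnglishLetter (PySem.List.pyGetD cs i ' ') then
        let fI := if st.1 = -1 then i else st.1
        let lI := i
        if st.2.2.2 - st.2.2.1 < lI - fI then (fI, lI, fI, lI)
        else (fI, lI, st.2.2.1, st.2.2.2)
      else (-1, 0, st.2.2.1, st.2.2.2))
    (-1, 0, 0, 0)
  String.ofList (PySem.List.slice cs (some st.2.2.1) (some (st.2.2.2 + 1)))

-- ===== PORT B =====
-- literal port of Source B: accumulate (runs, cur) over the characters, flush cur on non-letters,
-- then max(runs, key=len) — PySem.List.max? is Python's first-extremal max — or the empty string if runs is empty.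
def solution_alt (text : String) : String :=
  let p := text.toList.foldl
    (fun (p : List (List Char) × List Char) ch =>
      if isEnglishLetter ch then (p.1, p.2 ++ [ch])
      else ((if p.2 = [] then p.1 else p.1 ++ [p.2]), []))
    ([], [])
  let runs := if p.2 = [] then p.1 else p.1 ++ [p.2]
  match PySem.List.max? runs (fun r => r.length) with
  | some r => String.ofList r
  | none => ""

-- ===== PRECONDITION & SPEC =====
-- On nonempty text whose first character is not a letter and which contains no two consecutive
-- letters, A returns the text's first character (e.g. '.' for '.a', '1' for '123') because its
-- best-span tracker starts at indices (0,0); B returns the first single-letter run, or the empty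
-- string when the text contains no letters at all, which is the intended longest letter word.
def D_solution (text : String) : Prop :=
  text.toList ≠ [] ∧ isEnglishLetter text.toList.headI = false ∧
  List.IsChain (fun a b => isEnglishLetter a = false ∨ isEnglishLetter b = false) text.toList
instance (text : String) : Decidable (D_solution text) := by unfold D_solution; infer_instance

def Spec_solution (text : String) (out : String) : Prop := ¬ D_solution text → out = solution_alt text
instance (text : String) (out : String) : Decidable (Spec_solution text out) := by unfold Spec_solution; infer_instance

def pvDiffWitness_solution : String := ".a"
def pvDiffWitnessOut_solution : String × String := (".", "a")

-- ===== CLAIM (what is proved, stated in full; the proofs are below) =====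
def Claim_unchanged_solution : Prop := ∀ (text : String), Dom_solution text → Spec_solution text (solution text)
def Claim_changed_solution : Prop := Dom_solution (pvDiffWitness_solution) ∧ D_solution (pvDiffWitness_solution) ∧ solution (pvDiffWitness_solution) = pvDiffWitnessOut_solution.1 ∧ solution_alt (pvDiffWitness_solution) = pvDiffWitnessOut_solution.2 ∧ pvDiffWitnessOut_solution.1 ≠ pvDiffWitnessOut_solution.2
def Claim_exact_solution : Prop := ∀ (text : String), Dom_solution text → D_solution text → solution text ≠ solution_alt text

-- ===== LEMMAS AND PROOFS =====

-- A's loop step, on (index, character) pairs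
def stepA (st : Int × Int × Int × Int) (ic : Int × Char) : Int × Int × Int × Int :=
  if isEnglishLetter ic.2 then
    let fI := if st.1 = -1 then ic.1 else st.1
    let lI := ic.1
    if st.2.2.2 - st.2.2.1 < lI - fI then (fI, lI, fI, lI)
    else (fI, lI, st.2.2.1, st.2.2.2)
  else (-1, 0, st.2.2.1, st.2.2.2)

-- B's loop step
def stepB (p : List (List Char) × List Char) (ch : Char) : List (List Char) × List Char :=
  if isEnglishLetter ch then (p.1, p.2 ++ [ch])
  else ((if p.2 = [] then p.1 else p.1 ++ [p.2]), [])

def allRuns (p : List (List Char) × List Char) : List (List Char) :=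
  if p.2 = [] then p.1 else p.1 ++ [p.2]

def NoPair : Char → Char → Prop := fun a b => isEnglishLetter a = false ∨ isEnglishLetter b = false

-- the loop invariant tying A's state to B's state after processing the prefix `pref`
structure LoopInv (pref : List Char) (sa : Int × Int × Int × Int)
    (sb : List (List Char) × List Char) : Prop where
  cur_nil : sb.2 = [] → sa.1 = -1 ∧ sa.2.1 = 0
  cur_pos : sb.2 ≠ [] → sa.1 = (pref.length : Int) - sb.2.length ∧
      sa.2.1 = (pref.length : Int) - 1 ∧ pref.drop (pref.length - sb.2.length) = sb.2
  last_not : sb.2 = [] → ∀ x ∈ pref.getLast?, isEnglishLetter x = false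
  runs_ok : ∀ r ∈ allRuns sb, r ≠ [] ∧ ∀ c ∈ r, isEnglishLetter c = true
  no_letters : allRuns sb = [] → ∀ c ∈ pref, isEnglishLetter c = false
  elems : ∀ r ∈ allRuns sb, ∀ ch ∈ r, ch ∈ pref
  head_run : ∀ hd ∈ pref.head?, isEnglishLetter hd = true →
      ∃ t, (allRuns sb).head? = some (hd :: t)
  chain_big : ¬ List.IsChain NoPair pref → ∃ r ∈ allRuns sb, 2 ≤ r.length
  big_chain : ∀ r ∈ allRuns sb, 2 ≤ r.length → ¬ List.IsChain NoPair pref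
  best_none : PySem.List.max? (allRuns sb) (fun r => r.length) = none →
      sa.2.2.1 = 0 ∧ sa.2.2.2 = 0
  best_small : ∀ r, PySem.List.max? (allRuns sb) (fun r => r.length) = some r →
      r.length < 2 → sa.2.2.1 = 0 ∧ sa.2.2.2 = 0
  best_big : ∀ r, PySem.List.max? (allRuns sb) (fun r => r.length) = some r → 2 ≤ r.length →
      ∃ mf : Nat, sa.2.2.1 = (mf : Int) ∧ sa.2.2.2 = ((mf + r.length - 1 : Nat) : Int) ∧
        mf + r.length ≤ pref.length ∧ (pref.drop mf).take r.length = r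

lemma max?_append_singleton {α κ : Type} [LT κ] [DecidableLT κ] (xs : List α) (y : α) (key : α → κ) :
    PySem.List.max? (xs ++ [y]) key =
      match PySem.List.max? xs key with
      | none => some y
      | some m => if key m < key y then some y else some m := by
  simp only [PySem.List.max?, List.foldl_append, List.foldl_cons, List.foldl_nil]
  rfl

lemma max?_cons_of_no_beat {α κ : Type} [LT κ] [DecidableLT κ] (x : α) (t : List α) (key : α → κ)
    (h : ∀ y ∈ t, ¬ key x < key y) : PySem.List.max? (x :: t) key = some x := by
  have : ∀ (l : List α), (∀ y ∈ l, ¬ key x < key y) →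
      List.foldl (fun acc z => match acc with
        | none => some z
        | some m => if key m < key z then some z else some m) (some x) l = some x := by
    intro l
    induction l with
    | nil => intro _; rfl
    | cons a l ih =>
      intro hl
      simp only [List.foldl_cons]
      rw [if_neg (hl a (by simp))]
      exact ih (fun y hy => hl y (by simp [hy]))
  simpa [PySem.List.max?] using this t h


lemma take_drop_append (l m : List Char) (k L : Nat) (h : k + L ≤ l.length) :
    ((l ++ m).drop k).take L = (l.drop k).take L := by
  rw [List.drop_append_of_le_length (by omega), List.take_append_of_le_length (by simp; omega)]

lemma head?_append_left {α : Type} (l m : List α) (h : l ≠ []) : (l ++ m).head? = l.head? := by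
  cases l with
  | nil => exact absurd rfl h
  | cons a t => simp

lemma chain_of_concat (l : List Char) (c : Char) (h : ¬ List.IsChain NoPair l) :
    ¬ List.IsChain NoPair (l ++ [c]) :=
  fun hch => h (List.isChain_append.mp hch).1

lemma notChain_concat (l : List Char) (c x : Char) (hx : l.getLast? = some x)
    (h1 : isEnglishLetter x = true) (h2 : isEnglishLetter c = true) :
    ¬ List.IsChain NoPair (l ++ [c]) := by
  intro hch
  rcases (List.isChain_append.mp hch) with ⟨-, -, hlast⟩
  have hnp := hlast x hx c (by simp)
  rw [show NoPair x c = (isEnglishLetter x = false ∨ isEnglishLetter c = false) from rfl] at hnp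
  rcases hnp with hp | hp <;> simp_all

lemma notChain_of_concat (l : List Char) (c : Char) (hch : ¬ List.IsChain NoPair (l ++ [c]))
    (hv : ∀ x ∈ l.getLast?, NoPair x c) : ¬ List.IsChain NoPair l := by
  intro h1
  exact hch (List.isChain_append.mpr ⟨h1, by simp, by simpa using hv⟩)

-- one step preserves the invariant
lemma inv_step (pref : List Char) (sa : Int × Int × Int × Int)
    (sb : List (List Char) × List Char) (c : Char) (h : LoopInv pref sa sb) :
    LoopInv (pref ++ [c]) (stepA sa ((pref.length : Int), c)) (stepB sb c) := by
  obtain ⟨fI, lI, mfI, mlI⟩ := sa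
  obtain ⟨runs, cur⟩ := sb
  by_cases hc : isEnglishLetter c = true
  · by_cases hcur : cur = []
    · -- letter character, current run empty
      subst hcur
      obtain ⟨hfI, hlI⟩ := h.cur_nil rfl
      subst hfI; subst hlI
      have hAR0 : allRuns (runs, ([] : List Char)) = runs := by simp [allRuns]
      have h0 : 0 ≤ mlI - mfI := by
        rcases hK : PySem.List.max? runs (fun r => r.length) with _ | m
        · obtain ⟨e1, e2⟩ := h.best_none (by rw [hAR0]; exact hK)
          simp at e1 e2; omega
        · by_cases h2m : 2 ≤ m.length
          · obtain ⟨mf, e1, e2, -, -⟩ := h.best_big m (by rw [hAR0]; exact hK) h2m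
            simp at e1 e2; omega
          · obtain ⟨e1, e2⟩ := h.best_small m (by rw [hAR0]; exact hK) (by omega)
            simp at e1 e2; omega
      have hA : stepA (-1, 0, mfI, mlI) ((pref.length : Int), c) =
          ((pref.length : Int), (pref.length : Int), mfI, mlI) := by
        simp [stepA, hc]; omega
      have hB : stepB (runs, ([] : List Char)) c = (runs, [c]) := by
        simp [stepB, hc]
      rw [hA, hB]
      have hAR : allRuns (runs, [c]) = runs ++ [[c]] := by simp [allRuns]
      have hE := max?_append_singleton runs [c] (fun r => r.length)
      refine ⟨?_, ?_, ?_, ?_, ?_, ?_, ?_, ?_, ?_, ?_, ?_, ?_⟩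
      · intro hcc; simp at hcc
      · intro _
        refine ⟨by simp only [List.length_append, List.length_cons, List.length_nil]; push_cast; ring,
          by simp only [List.length_append, List.length_cons, List.length_nil]; push_cast; ring, by simp⟩
      · intro hcc; simp at hcc
      · rw [hAR]
        intro r hr
        rcases List.mem_append.mp hr with hr | hr
        · exact h.runs_ok r (by rw [hAR0]; exact hr)
        · simp at hr; subst hr
          exact ⟨by simp, by intro ch hch; simp at hch; subst hch; exact hc⟩
      · rw [hAR]; intro hnil; simp at hnil
      · rw [hAR]
        intro r hr ch hch
        rcases List.mem_append.mp hr with hr | hr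
        · exact List.mem_append_left _ (h.elems r (by rw [hAR0]; exact hr) ch hch)
        · simp at hr; subst hr; simp at hch; subst hch; simp
      · rw [hAR]
        intro hd hhd hlet
        cases pref with
        | nil =>
          simp at hhd; subst hhd
          have hrn : runs = [] := by
            cases runs with
            | nil => rfl
            | cons r t =>
              exfalso
              have h1 := (h.runs_ok r (by rw [hAR0]; simp)).1
              obtain ⟨ch, hch⟩ := List.exists_mem_of_ne_nil _ h1
              exact absurd (h.elems r (by rw [hAR0]; simp) ch hch) (by simp)
          exact ⟨[], by simp [hrn]⟩
        | cons a t =>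
          rw [head?_append_left _ _ (by simp)] at hhd
          obtain ⟨t', ht'⟩ := h.head_run hd hhd hlet
          rw [hAR0] at ht'
          have hrn : runs ≠ [] := by intro hr0; rw [hr0] at ht'; simp at ht'
          exact ⟨t', by rw [head?_append_left _ _ hrn]; exact ht'⟩
      · rw [hAR]
        intro hnc
        by_cases hcp : List.IsChain NoPair pref
        · exfalso
          refine (notChain_of_concat pref c hnc ?_) hcp
          intro x hx
          left
          simpa using h.last_not rfl x hx
        · obtain ⟨r, hr, hr2⟩ := h.chain_big hcp
          exact ⟨r, List.mem_append_left _ (by rw [hAR0] at hr; exact hr), hr2⟩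
      · rw [hAR]
        intro r hr hr2
        rcases List.mem_append.mp hr with hr | hr
        · exact chain_of_concat pref c (h.big_chain r (by rw [hAR0]; exact hr) hr2)
        · simp at hr; subst hr; simp at hr2
      · -- best_none: the new run list is nonempty, so max? is never none
        rw [hAR, hE]
        intro hmax
        rcases hK : PySem.List.max? runs (fun r => r.length) with _ | m <;> rw [hK] at hmax <;>
          simp only at hmax
        · simp at hmax
        · split at hmax <;> simp at hmax
      · -- best_small
        rw [hAR, hE]
        intro r hmax hlen
        rcases hK : PySem.List.max? runs (fun r => r.length) with _ | m <;> rw [hK] at hmax <;>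
          simp only at hmax
        · simp at hmax; subst hmax
          exact h.best_none (by rw [hAR0]; exact hK)
        · have hm1' : 1 ≤ m.length :=
            List.length_pos_iff.mpr (h.runs_ok m (by rw [hAR0]; exact PySem.List.max?_mem hK)).1
          rw [if_neg (by simp only [List.length_cons, List.length_nil]; omega)] at hmax
          simp at hmax; subst hmax
          exact h.best_small m (by rw [hAR0]; exact hK) hlen
      · -- best_big
        rw [hAR, hE]
        intro r hmax h2r
        rcases hK : PySem.List.max? runs (fun r => r.length) with _ | m <;> rw [hK] at hmax <;>
          simp only at hmax
        · simp at hmax; subst hmax; simp at h2r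
        · have hm1' : 1 ≤ m.length :=
            List.length_pos_iff.mpr (h.runs_ok m (by rw [hAR0]; exact PySem.List.max?_mem hK)).1
          rw [if_neg (by simp only [List.length_cons, List.length_nil]; omega)] at hmax
          simp at hmax; subst hmax
          obtain ⟨mf, e1, e2, e3, e4⟩ := h.best_big m (by rw [hAR0]; exact hK) h2r
          exact ⟨mf, e1, e2, by simp; omega, by rw [take_drop_append _ _ _ _ e3]; exact e4⟩
    · -- letter character, current run nonempty
      obtain ⟨hfI0, hlI0, hdrop0⟩ := h.cur_pos hcur
      have hfI : fI = (pref.length : Int) - cur.length := hfI0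
      have hlI : lI = (pref.length : Int) - 1 := hlI0
      have hdrop : pref.drop (pref.length - cur.length) = cur := hdrop0
      clear hfI0 hlI0 hdrop0
      have hLc0 : 0 < cur.length := List.length_pos_iff.mpr hcur
      have hLc : cur.length ≤ pref.length := by
        have := congrArg List.length hdrop
        simp at this; omega
      have hfne : fI ≠ -1 := by rw [hfI]; omega
      have hAR1 : allRuns (runs, cur) = runs ++ [cur] := by simp [allRuns, hcur]
      have hcurmem : cur ∈ allRuns (runs, cur) := by rw [hAR1]; simp
      have hcurlet : ∀ ch ∈ cur, isEnglishLetter ch = true := (h.runs_ok cur hcurmem).2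
      have hEold := max?_append_singleton runs cur (fun r => r.length)
      have hB : stepB (runs, cur) c = (runs, cur ++ [c]) := by simp [stepB, hc]
      rw [hB]
      have hAR : allRuns (runs, cur ++ [c]) = runs ++ [cur ++ [c]] := by simp [allRuns]
      have hE := max?_append_singleton runs (cur ++ [c]) (fun r => r.length)
      have hdrop' : (pref ++ [c]).drop (pref.length - cur.length) = cur ++ [c] := by
        rw [List.drop_append_of_le_length (by omega), hdrop]
      have F_cur : (pref ++ [c]).drop ((pref ++ [c]).length - (cur ++ [c]).length) = cur ++ [c] := by
        simpa using hdrop'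
      have F_runs_ok : ∀ r ∈ runs ++ [cur ++ [c]], r ≠ [] ∧ ∀ ch ∈ r, isEnglishLetter ch = true := by
        intro r hr
        rcases List.mem_append.mp hr with hr | hr
        · exact h.runs_ok r (by rw [hAR1]; exact List.mem_append_left _ hr)
        · simp at hr; subst hr
          refine ⟨by simp, ?_⟩
          intro ch hch
          rcases List.mem_append.mp hch with hch | hch
          · exact hcurlet ch hch
          · simp at hch; subst hch; exact hc
      have F_elems : ∀ r ∈ runs ++ [cur ++ [c]], ∀ ch ∈ r, ch ∈ pref ++ [c] := by
        intro r hr ch hch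
        rcases List.mem_append.mp hr with hr | hr
        · exact List.mem_append_left _ (h.elems r (by rw [hAR1]; exact List.mem_append_left _ hr) ch hch)
        · simp at hr; subst hr
          rcases List.mem_append.mp hch with hch | hch
          · exact List.mem_append_left _ (h.elems cur hcurmem ch hch)
          · simp at hch; subst hch; simp
      have hpne : pref ≠ [] := by
        intro h0
        obtain ⟨ch, hch⟩ := List.exists_mem_of_ne_nil _ hcur
        exact absurd (h.elems cur hcurmem ch hch) (by rw [h0]; simp)
      have F_head : ∀ hd ∈ (pref ++ [c]).head?, isEnglishLetter hd = true →
          ∃ t, (runs ++ [cur ++ [c]]).head? = some (hd :: t) := by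
        intro hd hhd hlet
        rw [head?_append_left _ _ hpne] at hhd
        obtain ⟨t', ht'⟩ := h.head_run hd hhd hlet
        rw [hAR1] at ht'
        cases runs with
        | nil =>
          simp at ht' ⊢
          rw [ht']
          exact ⟨t' ++ [c], by simp⟩
        | cons r0 rt =>
          simp at ht' ⊢
          exact ⟨t', ht'⟩
      have hlastpref : pref.getLast? = some (cur.getLast hcur) := by
        conv_lhs => rw [← List.take_append_drop (pref.length - cur.length) pref, hdrop]
        rw [List.getLast?_append_of_ne_nil _ hcur]
        rw [List.getLast?_eq_some_getLast hcur]
      have hlastlet : isEnglishLetter (cur.getLast hcur) = true :=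
        hcurlet _ (List.getLast_mem hcur)
      have F_chain_big : ¬ List.IsChain NoPair (pref ++ [c]) →
          ∃ r ∈ runs ++ [cur ++ [c]], 2 ≤ r.length := by
        intro _
        exact ⟨cur ++ [c], List.mem_append_right _ (by simp), by simp; omega⟩
      have F_big_chain : ∀ r ∈ runs ++ [cur ++ [c]], 2 ≤ r.length →
          ¬ List.IsChain NoPair (pref ++ [c]) := by
        intro r hr hr2
        exact notChain_concat pref c _ hlastpref hlastlet hc
      -- the old best span can never beat the span of a completed run strictly longer than cur
      by_cases hup : mlI - mfI < (pref.length : Int) - fI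
      · -- A updates its best span to the current run
        have hA : stepA (fI, lI, mfI, mlI) ((pref.length : Int), c) =
            (fI, (pref.length : Int), fI, (pref.length : Int)) := by
          simp only [stepA, if_pos hc, if_neg hfne]
          rw [if_pos hup]
        rw [hA]
        rw [hfI] at hup
        have hup' : mlI - mfI < (cur.length : Int) := by omega
        have hnewbest : ∃ mf : Nat, fI = (mf : Int) ∧
            (pref.length : Int) = ((mf + (cur ++ [c]).length - 1 : Nat) : Int) ∧
            mf + (cur ++ [c]).length ≤ (pref ++ [c]).length ∧
            ((pref ++ [c]).drop mf).take (cur ++ [c]).length = cur ++ [c] := by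
          refine ⟨pref.length - cur.length, by rw [hfI]; omega, by simp; omega, by simp; omega, ?_⟩
          rw [hdrop']
          simp
        refine ⟨by intro hcc; simp at hcc, fun _ => ⟨by rw [hfI]; simp only [List.length_append, List.length_cons, List.length_nil]; push_cast; ring, by simp, F_cur⟩,
          by intro hcc; simp at hcc,
          by rw [hAR]; exact F_runs_ok, by rw [hAR]; intro h0; simp at h0,
          by rw [hAR]; exact F_elems, by rw [hAR]; exact F_head,
          by rw [hAR]; exact F_chain_big, by rw [hAR]; exact F_big_chain, ?_, ?_, ?_⟩
        · rw [hAR, hE]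
          intro hmax
          rcases hK : PySem.List.max? runs (fun r => r.length) with _ | m <;> rw [hK] at hmax <;>
            simp only at hmax
          · simp at hmax
          · split at hmax <;> simp at hmax
        · rw [hAR, hE]
          intro r hmax hlen
          exfalso
          rcases hK : PySem.List.max? runs (fun r => r.length) with _ | m <;> rw [hK] at hmax <;>
            simp only at hmax
          · simp at hmax; subst hmax; simp only [List.length_append, List.length_cons, List.length_nil] at hlen; omega
          · have hm1' : 1 ≤ m.length :=
              List.length_pos_iff.mpr (h.runs_ok m (by rw [hAR1]; exact List.mem_append_left _ (PySem.List.max?_mem hK))).1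
            split at hmax <;> simp at hmax <;> subst hmax
            · simp only [List.length_append, List.length_cons, List.length_nil] at hlen; omega
            · next hml =>
              simp at hml
              -- m.length ≥ cur.length + 1 ≥ 2, so the old best came from m and was not beaten
              have hmax_old : PySem.List.max? (runs ++ [cur]) (fun r => r.length) = some m := by
                rw [hEold, hK]
                simp only
                rw [if_neg (by simp; omega)]
              obtain ⟨mf, e1, e2, -, -⟩ := h.best_big m (by rw [hAR1]; exact hmax_old) (by omega)
              simp at e1 e2
              omega
        · rw [hAR, hE]
          intro r hmax h2r
          rcases hK : PySem.List.max? runs (fun r => r.length) with _ | m <;> rw [hK] at hmax <;>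
            simp only at hmax
          · simp at hmax; subst hmax; exact hnewbest
          · split at hmax <;> simp at hmax <;> subst hmax
            · exact hnewbest
            · next hml =>
              exfalso
              simp at hml
              have hmax_old : PySem.List.max? (runs ++ [cur]) (fun r => r.length) = some m := by
                rw [hEold, hK]
                simp only
                rw [if_neg (by simp; omega)]
              obtain ⟨mf, e1, e2, -, -⟩ := h.best_big m (by rw [hAR1]; exact hmax_old) (by omega)
              simp at e1 e2
              omega
      · -- A keeps its best span
        have hA : stepA (fI, lI, mfI, mlI) ((pref.length : Int), c) =
            (fI, (pref.length : Int), mfI, mlI) := by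
          simp only [stepA, if_pos hc, if_neg hfne]
          rw [if_neg hup]
        rw [hA]
        rw [hfI] at hup
        have hup' : ¬ (mlI - mfI < (cur.length : Int)) := by omega
        -- hence the old best has length > cur.length, so it is a completed run
        have hold : ∃ m, PySem.List.max? (runs ++ [cur]) (fun r => r.length) = some m ∧
            (cur.length : Int) < m.length := by
          rcases hK : PySem.List.max? (runs ++ [cur]) (fun r => r.length) with _ | m
          · exfalso
            obtain ⟨e1, e2⟩ := h.best_none (by rw [hAR1]; exact hK)
            simp at e1 e2
            omega
          · refine ⟨m, rfl, ?_⟩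
            by_cases h2m : 2 ≤ m.length
            · obtain ⟨mf, e1, e2, -, -⟩ := h.best_big m (by rw [hAR1]; exact hK) h2m
              simp at e1 e2
              omega
            · exfalso
              obtain ⟨e1, e2⟩ := h.best_small m (by rw [hAR1]; exact hK) (by omega)
              simp at e1 e2
              omega
        obtain ⟨mBig, hmBig, hBigLen⟩ := hold
        -- mBig is in runs: it cannot be cur itself since it is strictly longer
        have hmBigruns : PySem.List.max? runs (fun r => r.length) = some mBig ∧
            cur.length < mBig.length := by
          have hl : cur.length < mBig.length := by exact_mod_cast hBigLen
          rcases hK : PySem.List.max? runs (fun r => r.length) with _ | m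
          · exfalso
            rw [hEold, hK] at hmBig
            simp at hmBig
            subst hmBig
            omega
          · rw [hEold, hK] at hmBig
            simp only at hmBig
            split at hmBig <;> simp at hmBig <;> subst hmBig
            · exact absurd hl (by omega)
            · exact ⟨rfl, hl⟩
        refine ⟨by intro hcc; simp at hcc, fun _ => ⟨by rw [hfI]; simp only [List.length_append, List.length_cons, List.length_nil]; push_cast; ring, by simp, F_cur⟩,
          by intro hcc; simp at hcc,
          by rw [hAR]; exact F_runs_ok, by rw [hAR]; intro h0; simp at h0,
          by rw [hAR]; exact F_elems, by rw [hAR]; exact F_head,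
          by rw [hAR]; exact F_chain_big, by rw [hAR]; exact F_big_chain, ?_, ?_, ?_⟩
        · rw [hAR, hE, hmBigruns.1]
          intro hmax
          simp only at hmax
          split at hmax <;> simp at hmax
        · rw [hAR, hE, hmBigruns.1]
          intro r hmax hlen
          exfalso
          simp only at hmax
          split at hmax <;> simp at hmax <;> subst hmax
          · simp only [List.length_append, List.length_cons, List.length_nil] at hlen; omega
          · have := hmBigruns.2; omega
        · rw [hAR, hE, hmBigruns.1]
          intro r hmax h2r
          simp only at hmax
          split at hmax <;> simp at hmax
          · next hml => exfalso; simp at hml; have := hmBigruns.2; omega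
          · subst hmax
            have hmax_old : PySem.List.max? (runs ++ [cur]) (fun r => r.length) = some mBig := by
              rw [hEold, hmBigruns.1]
              simp only
              rw [if_neg (by simp; have := hmBigruns.2; omega)]
            obtain ⟨mf, e1, e2, e3, e4⟩ := h.best_big mBig (by rw [hAR1]; exact hmax_old) h2r
            exact ⟨mf, e1, e2, by simp; omega, by rw [take_drop_append _ _ _ _ e3]; exact e4⟩
  · -- non-letter character
    simp only [Bool.not_eq_true] at hc
    have hA : stepA (fI, lI, mfI, mlI) ((pref.length : Int), c) = (-1, 0, mfI, mlI) := by
      simp [stepA, hc]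
    have hB : stepB (runs, cur) c = (allRuns (runs, cur), []) := by
      simp only [stepB, hc, Bool.false_eq_true, if_false, allRuns]
    rw [hA, hB]
    have hAR : allRuns (allRuns (runs, cur), ([] : List Char)) = allRuns (runs, cur) := by
      simp [allRuns]
    refine ⟨fun _ => ⟨rfl, rfl⟩, by intro hcc; exact absurd rfl hcc, ?_, ?_, ?_, ?_, ?_, ?_, ?_, ?_, ?_, ?_⟩
    · intro _ x hx
      simp at hx
      subst hx
      exact hc
    · rw [hAR]; exact h.runs_ok
    · rw [hAR]
      intro h0 ch hch
      rcases List.mem_append.mp hch with hch | hch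
      · exact h.no_letters h0 ch hch
      · simp at hch; subst hch; exact hc
    · rw [hAR]
      intro r hr ch hch
      exact List.mem_append_left _ (h.elems r hr ch hch)
    · rw [hAR]
      intro hd hhd hlet
      cases pref with
      | nil =>
        simp at hhd; subst hhd
        rw [hlet] at hc; simp at hc
      | cons a t =>
        rw [head?_append_left _ _ (by simp)] at hhd
        exact h.head_run hd hhd hlet
    · rw [hAR]
      intro hnc
      refine h.chain_big (notChain_of_concat pref c hnc ?_)
      intro x hx
      right
      simpa using hc
    · rw [hAR]
      intro r hr hr2
      exact chain_of_concat pref c (h.big_chain r hr hr2)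
    · rw [hAR]; exact h.best_none
    · rw [hAR]; exact h.best_small
    · rw [hAR]
      intro r hmax h2r
      obtain ⟨mf, e1, e2, e3, e4⟩ := h.best_big r hmax h2r
      exact ⟨mf, e1, e2, by simp; omega, by rw [take_drop_append _ _ _ _ e3]; exact e4⟩

lemma inv_fold (rest : List Char) : ∀ (pref : List Char) (sa : Int × Int × Int × Int)
    (sb : List (List Char) × List Char), LoopInv pref sa sb →
    LoopInv (pref ++ rest) ((PySem.List.enumerate rest (pref.length : Int)).foldl stepA sa)
      (rest.foldl stepB sb) := by
  induction rest with
  | nil => intro pref sa sb h; simpa using h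
  | cons c rest ih =>
    intro pref sa sb h
    have e : PySem.List.enumerate (c :: rest) (pref.length : Int) =
        ((pref.length : Int), c) :: PySem.List.enumerate rest ((pref.length : Int) + 1) := rfl
    rw [e]
    simp only [List.foldl_cons]
    have := ih (pref ++ [c]) (stepA sa ((pref.length : Int), c)) (stepB sb c) (inv_step pref sa sb c h)
    simpa [List.append_assoc] using this

lemma inv_init : LoopInv [] (-1, 0, 0, 0) ([], []) := by
  constructor <;> simp [allRuns, PySem.List.max?]

lemma inv_final (cs : List Char) :
    LoopInv cs ((PySem.List.enumerate cs 0).foldl stepA (-1, 0, 0, 0)) (cs.foldl stepB ([], [])) := by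
  simpa using inv_fold cs [] (-1, 0, 0, 0) ([], []) inv_init

-- the ports, re-expressed through stepA / stepB
lemma solution_eq (text : String) :
    solution text =
      String.ofList (PySem.List.slice text.toList
        (some ((PySem.List.enumerate text.toList 0).foldl stepA (-1, 0, 0, 0)).2.2.1)
        (some (((PySem.List.enumerate text.toList 0).foldl stepA (-1, 0, 0, 0)).2.2.2 + 1))) := by
  have e := PySem.List.enumerate_eq_map_pyRange text.toList ' '
  simp only [solution, stepA, e, List.foldl_map]
  rfl

lemma solution_alt_eq (text : String) :
    solution_alt text =
      match PySem.List.max? (allRuns (text.toList.foldl stepB ([], []))) (fun r => r.length) with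
      | some r => String.ofList r
      | none => "" := by
  rfl

-- extraction of the final answers from the invariant
lemma runs_final_small (cs : List Char) (r : List Char)
    (hM : PySem.List.max? (allRuns (cs.foldl stepB ([], []))) (fun r => r.length) = some r)
    (hr1 : r.length < 2) :
    List.IsChain NoPair cs ∧ cs ≠ [] := by
  have hinv := inv_final cs
  constructor
  · by_contra hnc
    obtain ⟨r', hr', h2⟩ := hinv.chain_big hnc
    have := PySem.List.max?_isMax hM r' hr'
    simp at this
    omega
  · have hmem := PySem.List.max?_mem hM
    obtain ⟨ch, hch⟩ := List.exists_mem_of_ne_nil _ (hinv.runs_ok r hmem).1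
    intro h0
    exact absurd (hinv.elems r hmem ch hch) (by rw [h0]; simp)

lemma runs_final_small_head (hd : Char) (tl : List Char) (r : List Char)
    (hM : PySem.List.max? (allRuns ((hd :: tl).foldl stepB ([], []))) (fun r => r.length) = some r)
    (hr1 : r.length < 2) (hlet : isEnglishLetter hd = true) : r = [hd] := by
  have hinv := inv_final (hd :: tl)
  obtain ⟨t, ht⟩ := hinv.head_run hd (by simp) hlet
  obtain ⟨R', hR'⟩ := List.head?_eq_some_iff.mp ht
  have hmemh : (hd :: t) ∈ allRuns ((hd :: tl).foldl stepB ([], [])) := by rw [hR']; simp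
  have ht1 := PySem.List.max?_isMax hM (hd :: t) hmemh
  simp at ht1
  have ht0 : t = [] := by
    cases t with
    | nil => rfl
    | cons a b => simp at ht1; omega
  subst ht0
  rw [hR'] at hM
  rw [max?_cons_of_no_beat _ _ _ ?_] at hM
  · simpa using hM.symm
  · intro y hy
    have := PySem.List.max?_isMax hM y (by simp [hy])
    simp at this ⊢
    omega

theorem solution_spec : Claim_unchanged_solution := by
  intro text _
  unfold Spec_solution
  intro hnD
  rw [solution_eq, solution_alt_eq]
  have hinv := inv_final text.toList
  rcases hM : PySem.List.max? (allRuns (text.toList.foldl stepB ([], []))) (fun r => r.length)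
    with _ | r
  · -- no letters at all: A returns text[:1]; impossible under ¬D unless text is empty
    obtain ⟨e1, e2⟩ := hinv.best_none hM
    rw [e1, e2]
    cases hcs : text.toList with
    | nil => simp [PySem.List.slice]
    | cons hd tl =>
      exfalso
      have hAR0 : allRuns (text.toList.foldl stepB ([], [])) = [] :=
        (PySem.List.max?_eq_none_iff _ _).mp hM
      apply hnD
      refine ⟨by rw [hcs]; simp, ?_, ?_⟩
      · rw [hcs]
        have := hinv.no_letters hAR0 hd (by rw [hcs]; simp)
        simpa using this
      · by_contra hnc
        obtain ⟨r', hr', -⟩ := hinv.chain_big hnc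
        rw [hAR0] at hr'
        simp at hr'
  · by_cases h2r : 2 ≤ r.length
    · obtain ⟨mf, e1, e2, e3, e4⟩ := hinv.best_big r hM h2r
      rw [e1, e2]
      have hcast : ((mf + r.length - 1 : Nat) : Int) + 1 = ((mf + r.length : Nat) : Int) := by
        omega
      rw [hcast, PySem.List.slice_natCast]
      rw [show mf + r.length - mf = r.length by omega, e4]
    · obtain ⟨e1, e2⟩ := hinv.best_small r hM (by omega)
      rw [e1, e2]
      obtain ⟨hchain, hne⟩ := runs_final_small text.toList r hM (by omega)
      have hlet : isEnglishLetter text.toList.headI = true := by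
        by_contra hl
        exact hnD ⟨hne, by simpa using hl, hchain⟩
      cases hcs : text.toList with
      | nil => exact absurd hcs hne
      | cons hd tl =>
        rw [hcs] at hlet
        simp at hlet
        have hr : r = [hd] := by
          apply runs_final_small_head hd tl r _ (by omega) hlet
          rw [← hcs]
          exact hM
        rw [show (0 : Int) + 1 = ((1 : Nat) : Int) by norm_num,
          show (0 : Int) = ((0 : Nat) : Int) by norm_num, PySem.List.slice_natCast]
        simp [hr]

theorem solution_changed : Claim_changed_solution := by
  unfold Claim_changed_solution; decide

theorem solution_tight : Claim_exact_solution := by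
  intro text _ hD
  obtain ⟨hne, hheadI, hchain⟩ := hD
  rw [solution_eq, solution_alt_eq]
  have hinv := inv_final text.toList
  obtain ⟨hd, tl, hcs⟩ := List.exists_cons_of_ne_nil hne
  · rw [hcs] at hheadI
    simp at hheadI
    have hsliceA : ∀ mfI mlI : Int, mfI = 0 → mlI = 0 →
        PySem.List.slice text.toList (some mfI) (some (mlI + 1)) = [hd] := by
      intro mfI mlI e1 e2
      rw [e1, e2, show (0 : Int) + 1 = ((1 : Nat) : Int) by norm_num,
        show (0 : Int) = ((0 : Nat) : Int) by norm_num, PySem.List.slice_natCast, hcs]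
      simp
    rcases hM : PySem.List.max? (allRuns (text.toList.foldl stepB ([], []))) (fun r => r.length)
      with _ | r
    · obtain ⟨e1, e2⟩ := hinv.best_none hM
      rw [hsliceA _ _ e1 e2]
      intro heq
      have := congrArg String.toList heq
      simp at this
    · by_cases h2r : 2 ≤ r.length
      · exfalso
        have := hinv.big_chain r (PySem.List.max?_mem hM) h2r
        exact this hchain
      · obtain ⟨e1, e2⟩ := hinv.best_small r hM (by omega)
        rw [hsliceA _ _ e1 e2]
        have hr1 : r ≠ [] := (hinv.runs_ok r (PySem.List.max?_mem hM)).1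
        obtain ⟨a, ta, hra⟩ := List.exists_cons_of_ne_nil hr1
        have hta : ta = [] := by
          cases ta with
          | nil => rfl
          | cons x y => rw [hra] at h2r; simp at h2r
        subst hta
        have halet : isEnglishLetter a = true :=
          (hinv.runs_ok r (PySem.List.max?_mem hM)).2 a (by rw [hra]; simp)
        rw [hra]
        intro heq
        have := congrArg String.toList heq
        simp at this
        rw [this] at hheadI
        rw [hheadI] at halet
        simp at halet
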